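-- pv_equiv track=rewrite | github.com/typedb/typedb-ml | kgcn/src/sampling/first.py | ordered_sample
-- ===== SOURCE A (Python) =====
-- def ordered_sample(population, sample_size):
--     """
--     Samples the population, taking the first `n` items (a.k.a `sample_size') encountered. If more samples are
--     requested than are available, repeat the first n until satisfied
--     :param population: An iterator of items to sample
--     :param sample_size: The number of items to retrieve from the population
--     :return: A list of the first `sample_size` items from the population
--     """
--
--     results = []
--     stored_items = []
--
--     for i, item in enumerate(population):
--         if i >= sample_size:
--             break
--         if i <= sample_size and stored_items is not None:
--             # If we aren't yet sure if we have enough items then record the ones we've seen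
--             stored_items.append(item)
--         else:
--             stored_items = None
--
--         results.append(item)  # add first n items in order
--
--     if len(results) > 0:
--         while len(results) < sample_size:
--             # Now we start sampling with replacement
--             n_additional_required = sample_size - len(results)
--             # if n_additional_required >= len(results):
--             #     results += results
--             # else:
--             results += results[:n_additional_required]
--     else:
--         return []
--
--     return results
-- ===== SOURCE B (Python) =====
-- def ordered_sample(population, sample_size):
--     # Single fused loop: pull from the population while it lasts; once it is
--     # exhausted, recycle already-emitted items via an advancing pointer.
--     out = []
--     it = iter(population)
--     sentinel = object()
--     k = 0  # next index to recycle once the source is exhausted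
--     while len(out) < sample_size:
--         item = next(it, sentinel)
--         if item is sentinel:
--             if not out:
--                 return []
--             item = out[k]  # k < len(out) always: k advances one per append
--             k += 1
--         out.append(item)
--     return out
-- ===== Notes on version B (the rewrite author's own statement) =====
-- stated objective: simpler
-- what changed: B replaces A's two staged phases (enumerate-collect with dead stored_items bookkeeping, then a geometric self-appending while loop with slicing) by one fused loop that pulls from the source until a sentinel signals exhaustion and then recycles already-emitted items one at a time via an advancing pointer; B also pulls at most sample_size items from the iterator where A pulls one extra.
import Mathlib
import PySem

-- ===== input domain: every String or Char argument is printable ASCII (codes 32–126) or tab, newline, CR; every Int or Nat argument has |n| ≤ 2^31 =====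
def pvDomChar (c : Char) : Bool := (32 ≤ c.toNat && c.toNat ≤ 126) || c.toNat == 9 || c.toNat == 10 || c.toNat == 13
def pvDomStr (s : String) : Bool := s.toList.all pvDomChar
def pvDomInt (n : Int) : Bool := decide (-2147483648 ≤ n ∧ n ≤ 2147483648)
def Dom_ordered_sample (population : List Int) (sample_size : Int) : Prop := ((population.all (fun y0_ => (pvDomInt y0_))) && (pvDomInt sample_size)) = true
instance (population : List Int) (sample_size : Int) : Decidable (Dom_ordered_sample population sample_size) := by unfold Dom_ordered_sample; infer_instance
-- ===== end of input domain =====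

-- B fuses A's two staged phases (collect, then geometric self-appending fill)
-- into one loop that pulls from the source until exhausted and then recycles
-- already-emitted items one at a time via an advancing pointer; objective:
-- simpler.  B pulls at most sample_size items from the population iterator
-- where A pulls one extra (return value unaffected for list inputs).

-- ===== PORT A =====
-- 'for i, item in enumerate(population)' with break at i >= sample_size;
-- carries the (dead) stored_items state exactly as A does.
def aLoop (pop : List Int) (sample_size : Int) (i : Int) (results : List Int)
    (stored : Option (List Int)) : List Int :=
  match pop with
  | [] => results
  | item :: rest =>
    if i ≥ sample_size then results
    else
      let stored' := if i ≤ sample_size ∧ stored.isSome then stored.map (fun s => s ++ [item]) else none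
      aLoop rest sample_size (i + 1) (results ++ [item]) stored'

-- 'while len(results) < sample_size: results += results[:sample_size - len(results)]'.
-- The 'results ≠ []' conjunct is only a termination guard: A reaches this loop
-- only with a nonempty results list, and appending keeps it nonempty.
def aFill (sample_size : Int) (results : List Int) : List Int :=
  if _h : (results.length : Int) < sample_size ∧ results ≠ [] then
    aFill sample_size (results ++ results.take (sample_size - (results.length : Int)).toNat)
  else results
termination_by (sample_size - (results.length : Int)).toNat
decreasing_by
  have hpos : 0 < results.length := List.length_pos_of_ne_nil _h.2
  simp only [List.length_append, List.length_take]
  omega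

def ordered_sample (population : List Int) (sample_size : Int) : List Int :=
  let results := aLoop population sample_size 0 [] (some [])
  if results.length > 0 then aFill sample_size results else []

-- ===== PORT B =====
-- Source B's single 'while len(out) < sample_size' loop: 'rem' is the unconsumed
-- part of the iterator; 'rem = []' is the sentinel branch, which either
-- returns [] (out empty) or recycles out[k] (always in range: k advances one
-- per append, so k < out.length throughout).
def bLoop (rem : List Int) (sample_size : Int) (out : List Int) (k : Nat) : List Int :=
  if (out.length : Int) < sample_size then
    match rem with
    | item :: rest => bLoop rest sample_size (out ++ [item]) k
    | [] =>
      if out = [] then []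
      else bLoop [] sample_size (out ++ [out.getD k 0]) (k + 1)
  else out
termination_by (sample_size - (out.length : Int)).toNat
decreasing_by
  all_goals simp only [List.length_append, List.length_cons, List.length_nil]; omega

def ordered_sample_alt (population : List Int) (sample_size : Int) : List Int :=
  bLoop population sample_size [] 0

-- ===== PRECONDITION & SPEC =====
def Spec_ordered_sample (population : List Int) (sample_size : Int) (out : List Int) : Prop := out = ordered_sample_alt population sample_size
instance (population : List Int) (sample_size : Int) (out : List Int) : Decidable (Spec_ordered_sample population sample_size out) := by unfold Spec_ordered_sample; infer_instance

-- ===== CLAIM (what is proved, stated in full; the proofs are below) =====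
def Claim_equal_ordered_sample : Prop := ∀ (population : List Int) (sample_size : Int), Dom_ordered_sample population sample_size → Spec_ordered_sample population sample_size (ordered_sample population sample_size)

-- ===== LEMMAS AND PROOFS =====

-- the cyclic extension of b to length n
def cyc (b : List Int) (n : Nat) : List Int :=
  (List.range n).map (fun i => b.getD (i % b.length) 0)

theorem cyc_length (b : List Int) (n : Nat) : (cyc b n).length = n := by
  simp [cyc]

theorem cyc_self (b : List Int) : cyc b b.length = b := by
  apply List.ext_getElem
  · simp [cyc]
  · intro i h1 h2
    simp only [cyc, List.getElem_map, List.getElem_range, Nat.mod_eq_of_lt h2]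
    exact List.getD_eq_getElem _ _ h2

theorem cyc_append (b : List Int) (n t : Nat) (hd : b.length ∣ n) :
    cyc b (n + t) = cyc b n ++ cyc b t := by
  obtain ⟨c, rfl⟩ := hd
  simp only [cyc, List.range_add, List.map_append, List.map_map]
  congr 1
  apply List.map_congr_left
  intro i _
  simp

theorem cyc_take (b : List Int) (n t : Nat) (h : t ≤ n) :
    (cyc b n).take t = cyc b t := by
  rw [cyc, cyc, ← List.map_take, List.take_range, Nat.min_eq_left h]

theorem cyc_ne_nil (b : List Int) (n : Nat) (h : 0 < n) : cyc b n ≠ [] := by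
  intro hc
  have := cyc_length b n
  rw [hc] at this
  simp at this
  omega

theorem cyc_succ (b : List Int) (n : Nat) :
    cyc b (n + 1) = cyc b n ++ [b.getD (n % b.length) 0] := by
  simp [cyc, List.range_succ]

-- reading cyc's own element n - L back (the recycle pointer)
theorem cyc_getD (b : List Int) (n : Nat) (hL : 0 < b.length) (hn : b.length ≤ n) :
    (cyc b n).getD (n - b.length) 0 = b.getD (n % b.length) 0 := by
  have hlt : n - b.length < n := by omega
  rw [cyc, List.getD_eq_getElem _ _ (by simpa using hlt)]
  simp only [List.getElem_map, List.getElem_range]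
  rw [← Nat.mod_eq_sub_mod hn]

theorem aFill_cyc (b : List Int) (_hb : b ≠ []) :
    ∀ (fuel : Nat) (s : Int) (n : Nat), (s - (n : Int)).toNat ≤ fuel →
      0 < n → b.length ∣ n → ((n : Nat) : Int) ≤ s →
      aFill s (cyc b n) = cyc b s.toNat := by
  intro fuel
  induction fuel with
  | zero =>
    intro s n hfuel hn hdvd hle
    rw [aFill]
    have hstop : ¬ (((cyc b n).length : Int) < s ∧ cyc b n ≠ []) := by
      rw [cyc_length]; omega
    rw [dif_neg hstop]
    congr 1
    omega
  | succ fuel ih =>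
    intro s n hfuel hn hdvd hle
    by_cases hlt : ((n : Nat) : Int) < s
    · rw [aFill]
      have hne : cyc b n ≠ [] := cyc_ne_nil b _ hn
      have hcond : ((cyc b n).length : Int) < s ∧ cyc b n ≠ [] := by
        rw [cyc_length]; exact ⟨hlt, hne⟩
      rw [dif_pos hcond]
      simp only [cyc_length]
      by_cases hcase : (s - (n : Int)).toNat < n
      · rw [cyc_take b n _ (le_of_lt hcase), ← cyc_append b n _ hdvd]
        have hsz : n + (s - (n : Int)).toNat = s.toNat := by omega
        rw [hsz, aFill]
        have hstop : ¬ (((cyc b s.toNat).length : Int) < s ∧ cyc b s.toNat ≠ []) := by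
          rw [cyc_length]; omega
        rw [dif_neg hstop]
      · have htake : (cyc b n).take (s - (n : Int)).toNat = cyc b n := by
          apply List.take_of_length_le
          rw [cyc_length]; omega
        rw [htake, ← cyc_append b n n hdvd]
        exact ih s (n + n) (by omega) (by omega) (Dvd.dvd.add hdvd hdvd) (by omega)
    · rw [aFill]
      have hstop : ¬ (((cyc b n).length : Int) < s ∧ cyc b n ≠ []) := by
        rw [cyc_length]; omega
      rw [dif_neg hstop]
      congr 1
      omega

-- A's enumerate loop appends exactly the next (s - |r|) items
theorem aLoop_prefix (s : Int) :
    ∀ (pop : List Int) (r : List Int) (st : Option (List Int)),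
      aLoop pop s (r.length : Int) r st = r ++ pop.take (s - (r.length : Int)).toNat := by
  intro pop
  induction pop with
  | nil => intro r st; simp [aLoop]
  | cons item rest ih =>
    intro r st
    rw [aLoop]
    by_cases h : ((r.length : Int) ≥ s)
    · simp only [h, if_true]
      have : (s - (r.length : Int)).toNat = 0 := by omega
      simp [this]
    · simp only [h, if_false]
      have hlen : ((r.length : Int)) + 1 = (((r ++ [item]).length : Nat) : Int) := by simp
      rw [hlen, ih (r ++ [item])]
      have hk : (s - (r.length : Int)).toNat = (s - ((r ++ [item]).length : Int)).toNat + 1 := by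
        simp only [List.length_append, List.length_cons, List.length_nil]
        omega
      rw [hk, List.take_succ_cons]
      simp

-- B's consuming phase: the source is drained into out (k stays fixed)
theorem bLoop_phase1 (s : Int) :
    ∀ (pop : List Int) (out : List Int) (k : Nat),
      bLoop pop s out k = bLoop [] s (out ++ pop.take (s - (out.length : Int)).toNat) k := by
  intro pop
  induction pop with
  | nil => intro out k; simp
  | cons item rest ih =>
    intro out k
    rw [bLoop]
    by_cases h : ((out.length : Int) < s)
    · rw [if_pos h, ih (out ++ [item])]
      have hk : (s - (out.length : Int)).toNat = (s - ((out ++ [item]).length : Int)).toNat + 1 := by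
        simp only [List.length_append, List.length_cons, List.length_nil]
        omega
      rw [hk, List.take_succ_cons]
      simp
    · rw [if_neg h]
      have h0 : (s - (out.length : Int)).toNat = 0 := by omega
      rw [h0]
      simp [bLoop, h]

-- B's recycling phase builds the cyclic extension one element at a time
theorem bLoop_phase2 (b : List Int) (hb : b ≠ []) :
    ∀ (fuel : Nat) (s : Int) (n : Nat), (s - (n : Int)).toNat ≤ fuel →
      b.length ≤ n → ((n : Nat) : Int) ≤ s →
      bLoop [] s (cyc b n) (n - b.length) = cyc b s.toNat := by
  have hL : 0 < b.length := List.length_pos_of_ne_nil hb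
  intro fuel
  induction fuel with
  | zero =>
    intro s n hfuel hn hle
    rw [bLoop]
    have : ¬ (((cyc b n).length : Int) < s) := by rw [cyc_length]; omega
    rw [if_neg this]
    congr 1
    omega
  | succ fuel ih =>
    intro s n hfuel hn hle
    by_cases hlt : ((n : Nat) : Int) < s
    · rw [bLoop]
      rw [if_pos (by rw [cyc_length]; exact hlt)]
      have hne : cyc b n ≠ [] := cyc_ne_nil b _ (by omega)
      simp only [hne, if_false]
      rw [cyc_getD b n hL hn, ← cyc_succ]
      have hk : n - b.length + 1 = (n + 1) - b.length := by omega
      rw [hk]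
      exact ih s (n + 1) (by omega) (by omega) (by omega)
    · rw [bLoop]
      have : ¬ (((cyc b n).length : Int) < s) := by rw [cyc_length]; omega
      rw [if_neg this]
      congr 1
      omega

-- ===== VERDICT (by name: the statement is the Claim_ definition above) =====
theorem ordered_sample_spec : Claim_equal_ordered_sample := by
  intro pop s _
  unfold Spec_ordered_sample ordered_sample ordered_sample_alt
  have hA : aLoop pop s 0 [] (some []) = pop.take s.toNat := by
    have := aLoop_prefix s pop [] (some [])
    simpa using this
  have hB : bLoop pop s [] 0 = bLoop [] s (pop.take s.toNat) 0 := by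
    have := bLoop_phase1 s pop [] 0
    simpa using this
  rw [hA, hB]
  set b := pop.take s.toNat with hbdef
  by_cases hb : b = []
  · rw [hb]
    simp only [List.length_nil, gt_iff_lt, Nat.lt_irrefl, if_false]
    rw [bLoop]
    split
    · rfl
    · rfl
  · have hL : 0 < b.length := List.length_pos_of_ne_nil hb
    simp only [hL, if_pos]
    by_cases hlt : ((b.length : Nat) : Int) < s
    · rw [← cyc_self b]
      rw [aFill_cyc b hb (s - (b.length : Int)).toNat s b.length (by omega) hL (dvd_refl _) (by omega)]
      have := bLoop_phase2 b hb (s - (b.length : Int)).toNat s b.length (by omega) (le_refl _) (by omega)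
      rw [Nat.sub_self] at this
      rw [← cyc_self b] at this ⊢
      rw [this]
    · rw [aFill]
      rw [dif_neg (by omega)]
      rw [bLoop, if_neg (by omega)]
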